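-- pv_equiv track=rewrite | github.com/lsds/Tempo | tempo/transformations/incrementalization/incrementalization_policy.py | get_divisor_at_percentile
-- ===== SOURCE A (Python) =====
-- def get_divisor_at_percentile(n: int, percentile: int = 75) -> int:
--     """Get the divisor at the given percentile of the sorted divisors of n.
--     NOTE: If used as a block size, larger percentiles will result in larger block sizes,
--     meaning fewer block iterations.
--
--     """
--     divisors = sorted({d for i in range(1, int(n**0.5) + 1) if n % i == 0 for d in (i, n // i)})
--
--     if not 0 <= percentile <= 100:
--         raise ValueError("Percentile must be between 0 and 100")
--
--     if not divisors:
--         return 1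
--
--     # Calculate index based on percentile
--     index = (len(divisors) - 1) * percentile // 100
--     return divisors[int(round(index))]
-- ===== SOURCE B (Python) =====
-- def get_divisor_at_percentile(n: int, percentile: int = 75) -> int:
--     """Get the divisor at the given percentile of the sorted divisors of n."""
--     if not 0 <= percentile <= 100:
--         raise ValueError("Percentile must be between 0 and 100")
--
--     if n == 0:
--         return 1  # no enumerable divisors
--
--     # Prime factorisation of n by trial division.
--     factors = []
--     m = n
--     d = 2
--     while d * d <= m:
--         if m % d == 0:
--             e = 0
--             while m % d == 0:
--                 m //= d
--                 e += 1
--             factors.append((d, e))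
--         d += 1
--     if m > 1:
--         factors.append((m, 1))
--
--     # Generate every divisor as a product of prime powers.
--     divisors = [1]
--     for p, e in factors:
--         pe, scaled = 1, []
--         for _ in range(e):
--             pe *= p
--             scaled += [x * pe for x in divisors]
--         divisors += scaled
--
--     divisors.sort()
--     index = (len(divisors) - 1) * percentile // 100
--     return divisors[index]
-- ===== Notes on version B (the rewrite author's own statement) =====
-- stated objective: alternative
-- what changed: B computes the prime factorisation of n by trial division and generates all divisors as products of prime powers, instead of A's sqrt-bounded divisor-pair enumeration into a set; the factorisation loop shrinks n as factors are stripped, so it usually scans far less than sqrt(n).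
import Mathlib
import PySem

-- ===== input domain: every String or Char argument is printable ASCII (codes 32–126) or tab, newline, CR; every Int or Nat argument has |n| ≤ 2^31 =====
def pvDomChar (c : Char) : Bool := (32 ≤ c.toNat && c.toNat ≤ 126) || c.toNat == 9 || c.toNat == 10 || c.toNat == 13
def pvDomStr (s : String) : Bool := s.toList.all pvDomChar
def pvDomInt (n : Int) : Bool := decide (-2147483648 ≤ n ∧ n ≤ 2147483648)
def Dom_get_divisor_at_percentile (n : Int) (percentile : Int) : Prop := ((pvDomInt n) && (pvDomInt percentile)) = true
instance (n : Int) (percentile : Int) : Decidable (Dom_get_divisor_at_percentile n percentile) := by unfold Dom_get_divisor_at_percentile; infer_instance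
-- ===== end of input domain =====

-- B factorises n into prime powers by trial division and generates the divisor list as products
-- of those prime powers, instead of A's sqrt-bounded divisor-pair enumeration into a set;
-- return values agree on Pre_.

-- ===== PORT A =====
-- int(n**0.5) is ported as Int.sqrt; exact for 0 ≤ n ≤ 2^31 (float sqrt is correctly rounded and
-- cannot cross an integer below 2^52); n < 0 (Python TypeError) is excluded by Pre_.
def get_divisor_at_percentile (n : Int) (percentile : Int) : Int :=
  -- divisors = sorted({d for i in range(1, int(n**0.5) + 1) if n % i == 0 for d in (i, n // i)})
  let divisorsSet : PySem.Set Int :=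
    (PySem.List.pyRange 1 (Int.sqrt n + 1) 1).foldl
      (fun acc i =>
        if PySem.Int.mod n i = 0 then
          PySem.Set.add (PySem.Set.add acc i) (PySem.Int.floordiv n i)
        else acc)
      PySem.Set.empty
  let divisors : List Int := PySem.List.sorted divisorsSet (fun x => x) false
  if ¬ (0 ≤ percentile ∧ percentile ≤ 100) then 0  -- raise ValueError (excluded by Pre_)
  else if divisors = [] then 1
  else
    -- index = (len(divisors) - 1) * percentile // 100 ; round(int) = the int itself
    (PySem.List.pyGet? divisors
      (PySem.Int.floordiv (((divisors.length : Int) - 1) * percentile) 100)).getD 0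

-- ===== PORT B =====
-- inner loop 'e = 0; while m % d == 0: m //= d; e += 1' → (final m, e)
-- (fuel is a totality guard only: m.toNat bounds the number of divisions performed)
def pvStrip (m d : Int) (fuel : Nat) : Int × Int :=
  match fuel with
  | 0 => (m, 0)
  | fuel + 1 =>
    if PySem.Int.mod m d = 0 then
      let r := pvStrip (PySem.Int.floordiv m d) d fuel
      (r.1, r.2 + 1)
    else (m, 0)

-- outer loop 'while d * d <= m: if m % d == 0: …strip…; factors.append((d, e)); d += 1'
-- (fuel is a totality guard only: n.toNat + 1 bounds the number of increments of d)
def pvFac (m d : Int) (fuel : Nat) (acc : List (Int × Int)) : Int × List (Int × Int) :=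
  match fuel with
  | 0 => (m, acc)
  | fuel + 1 =>
    if d * d ≤ m then
      if PySem.Int.mod m d = 0 then
        let r := pvStrip m d m.toNat
        pvFac r.1 (d + 1) fuel (acc ++ [(d, r.2)])
      else pvFac m (d + 1) fuel acc
    else (m, acc)

-- 'pe, scaled = 1, []; for _ in range(e): pe *= p; scaled += [x * pe for x in divisors]'
def pvScale (divs : List Int) (p : Int) (e : Int) : List Int :=
  ((PySem.List.pyRange 0 e 1).foldl
    (fun st _ => (st.1 * p, st.2 ++ divs.map (fun x => x * (st.1 * p)))) (1, ([] : List Int))).2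

-- 'divisors = [1]; for p, e in factors: …; divisors += scaled'
def pvGen (factors : List (Int × Int)) : List Int :=
  factors.foldl (fun divs pe => divs ++ pvScale divs pe.1 pe.2) [1]

def get_divisor_at_percentile_alt (n : Int) (percentile : Int) : Int :=
  if ¬ (0 ≤ percentile ∧ percentile ≤ 100) then 0  -- raise ValueError (excluded by Pre_)
  else if n = 0 then 1  -- no enumerable divisors
  else
    let f := pvFac n 2 (n.toNat + 1) []
    let factors := if 1 < f.1 then f.2 ++ [(f.1, 1)] else f.2
    -- divisors.sort() ported as the library sort
    let divisors : List Int := PySem.List.sorted (pvGen factors) (fun x => x) false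
    (PySem.List.pyGet? divisors
      (PySem.Int.floordiv (((divisors.length : Int) - 1) * percentile) 100)).getD 0

-- ===== PRECONDITION & SPEC =====
-- Pre_ excludes n < 0, where A raises TypeError (n**0.5 is complex), and percentile outside
-- 0..100, where A raises ValueError.
def Pre_get_divisor_at_percentile (n : Int) (percentile : Int) : Prop :=
  0 ≤ n ∧ 0 ≤ percentile ∧ percentile ≤ 100
instance (n : Int) (percentile : Int) : Decidable (Pre_get_divisor_at_percentile n percentile) := by
  unfold Pre_get_divisor_at_percentile; infer_instance

def pvWitness_get_divisor_at_percentile : Int × Int := (36, 50)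

def Spec_get_divisor_at_percentile (n : Int) (percentile : Int) (out : Int) : Prop :=
  out = get_divisor_at_percentile_alt n percentile
instance (n : Int) (percentile : Int) (out : Int) :
    Decidable (Spec_get_divisor_at_percentile n percentile out) := by
  unfold Spec_get_divisor_at_percentile; infer_instance

-- ===== CLAIM (what is proved, stated in full; the proofs are below) =====
def Claim_equal_get_divisor_at_percentile : Prop :=
  ∀ (n : Int) (percentile : Int), Dom_get_divisor_at_percentile n percentile →
    Pre_get_divisor_at_percentile n percentile →
    Spec_get_divisor_at_percentile n percentile (get_divisor_at_percentile n percentile)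

-- ===== LEMMAS AND PROOFS =====

-- the set comprehension of A, as a named value
def pvASet (n : Int) : PySem.Set Int :=
  (PySem.List.pyRange 1 (Int.sqrt n + 1) 1).foldl
    (fun acc i => if PySem.Int.mod n i = 0 then
        PySem.Set.add (PySem.Set.add acc i) (PySem.Int.floordiv n i) else acc)
    PySem.Set.empty

-- the canonical ascending divisor list both sorts are shown to equal
def pvCanon (n : Int) : List Int :=
  (PySem.List.pyRange 1 (n + 1) 1).filter (fun d => decide ((d : Int) ∣ n))

theorem pv_le_sqrt (n i : Int) (hn : 0 ≤ n) (hi : 1 ≤ i) : i * i ≤ n ↔ i ≤ Int.sqrt n := by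
  have hs : Int.sqrt n = ((Nat.sqrt n.toNat : Nat) : Int) := by rw [Int.sqrt]
  have h1 : i.toNat ≤ Nat.sqrt n.toNat ↔ i.toNat * i.toNat ≤ n.toNat := Nat.le_sqrt
  have h2 : (i.toNat : Int) = i := Int.toNat_of_nonneg (by omega)
  constructor
  · intro h
    rw [hs]
    have htn : i.toNat * i.toNat ≤ n.toNat := by
      have : (i.toNat * i.toNat : Int) ≤ (n.toNat : Int) := by push_cast [h2]; omega
      exact_mod_cast this
    have := h1.mpr htn; omega
  · intro h
    rw [hs] at h
    have h3 : i.toNat ≤ Nat.sqrt n.toNat := by omega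
    have h4 := h1.mp h3
    have : (i.toNat * i.toNat : Int) ≤ (n.toNat : Int) := by exact_mod_cast h4
    push_cast [h2] at this; omega

theorem pv_sqrt_mono (a b : Int) (ha : 0 ≤ a) (hab : a ≤ b) : Int.sqrt a ≤ Int.sqrt b := by
  rw [Int.sqrt, Int.sqrt]
  have : a.toNat ≤ b.toNat := by omega
  exact_mod_cast Nat.sqrt_le_sqrt this

theorem pv_lt_of_sqrt_lt (m d : Int) (hm : 0 ≤ m) (hd : 1 ≤ d) (h : Int.sqrt m < d) :
    m < d * d := by
  by_contra hc
  push_neg at hc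
  have := (pv_le_sqrt m d hm hd).mp hc
  omega

theorem pv_mem_fold (n : Int) (l : List Int) (acc : PySem.Set Int) (x : Int) :
    x ∈ l.foldl (fun acc i => if PySem.Int.mod n i = 0 then
        PySem.Set.add (PySem.Set.add acc i) (PySem.Int.floordiv n i) else acc) acc ↔
      x ∈ acc ∨ ∃ i ∈ l, PySem.Int.mod n i = 0 ∧ (x = i ∨ x = PySem.Int.floordiv n i) := by
  induction l generalizing acc with
  | nil => simp
  | cons a t ih =>
    simp only [List.foldl_cons]
    by_cases h : PySem.Int.mod n a = 0
    · rw [if_pos h, ih]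
      simp only [PySem.Set.mem_add, List.mem_cons]
      constructor
      · rintro (((hx | hx) | hx) | ⟨i, hi, hm, hv⟩)
        · exact Or.inl hx
        · exact Or.inr ⟨a, Or.inl rfl, h, Or.inl hx⟩
        · exact Or.inr ⟨a, Or.inl rfl, h, Or.inr hx⟩
        · exact Or.inr ⟨i, Or.inr hi, hm, hv⟩
      · rintro (hx | ⟨i, (rfl | hi), hm, hv⟩)
        · exact Or.inl (Or.inl (Or.inl hx))
        · rcases hv with rfl | rfl
          · exact Or.inl (Or.inl (Or.inr rfl))
          · exact Or.inl (Or.inr rfl)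
        · exact Or.inr ⟨i, hi, hm, hv⟩
    · rw [if_neg h, ih]
      simp only [List.mem_cons]
      constructor
      · rintro (hx | ⟨i, hi, hm, hv⟩)
        · exact Or.inl hx
        · exact Or.inr ⟨i, Or.inr hi, hm, hv⟩
      · rintro (hx | ⟨i, (rfl | hi), hm, hv⟩)
        · exact Or.inl hx
        · exact absurd hm h
        · exact Or.inr ⟨i, hi, hm, hv⟩

theorem pv_nodup_fold (n : Int) (l : List Int) (acc : PySem.Set Int) (h : acc.Nodup) :
    (l.foldl (fun acc i => if PySem.Int.mod n i = 0 then
        PySem.Set.add (PySem.Set.add acc i) (PySem.Int.floordiv n i) else acc) acc).Nodup := by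
  induction l generalizing acc with
  | nil => exact h
  | cons a t ih =>
    simp only [List.foldl_cons]
    split
    · exact ih _ (PySem.Set.nodup_add _ _ (PySem.Set.nodup_add _ _ h))
    · exact ih _ h

-- membership of A's set = the positive divisors, for 1 ≤ n
theorem pv_mem_aset (n x : Int) (hn : 1 ≤ n) :
    x ∈ pvASet n ↔ 0 < x ∧ x ∣ n := by
  unfold pvASet
  rw [pv_mem_fold]
  simp only [PySem.Set.empty, List.not_mem_nil, false_or, PySem.List.mem_pyRange_one,
    PySem.Int.mod_eq_zero_iff_dvd]
  constructor
  · rintro ⟨i, ⟨hi1, hi2⟩, hdvd, rfl | rfl⟩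
    · exact ⟨by omega, hdvd⟩
    · have hipos : 0 < i := by omega
      have hfd : PySem.Int.floordiv n i = n / i := PySem.Int.floordiv_eq_ediv_of_pos hipos
      have hni : n / i * i = n := Int.ediv_mul_cancel hdvd
      constructor
      · rw [hfd]; nlinarith [hni]
      · rw [hfd]; exact ⟨i, hni.symm⟩
  · rintro ⟨hx, hdvd⟩
    have hq : x * (n / x) = n := Int.mul_ediv_cancel' hdvd
    have hqpos : 0 < n / x := by nlinarith [hq]
    by_cases hle : x * x ≤ n
    · refine ⟨x, ⟨by omega, ?_⟩, hdvd, Or.inl rfl⟩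
      have := (pv_le_sqrt n x (by omega) (by omega)).mp hle
      omega
    · push_neg at hle
      have hqlt : n / x < x := by nlinarith [hq]
      have hq2 : (n / x) * (n / x) ≤ n := by nlinarith [hq]
      refine ⟨n / x, ⟨by omega, ?_⟩,
        ⟨x, by linarith [hq, mul_comm x (n / x)]⟩, Or.inr ?_⟩
      · have := (pv_le_sqrt n (n / x) (by omega) (by omega)).mp hq2
        omega
      · have hfd : PySem.Int.floordiv n (n / x) = n / (n / x) :=
          PySem.Int.floordiv_eq_ediv_of_pos hqpos
        have hrw : n / (n / x) = x := by
          have h : n / x * x = n := by linarith [mul_comm x (n / x)]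
          calc n / (n / x) = n / x * x / (n / x) := by rw [h]
            _ = x := Int.mul_ediv_cancel_left _ (by omega)
        rw [hfd, hrw]

-- an Int with no divisor in [2, p) is prime
theorem pv_int_prime_of (p : Int) (h2 : 2 ≤ p)
    (h : ∀ k : Int, 2 ≤ k → k < p → ¬ k ∣ p) : Prime p := by
  rw [Int.prime_iff_natAbs_prime, Nat.prime_def_lt]
  have hp0 : (p.natAbs : Int) = p := Int.natAbs_of_nonneg (by omega)
  refine ⟨by omega, ?_⟩
  intro m hm hdvd
  by_contra hne
  have hm0 : m ≠ 0 := by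
    rintro rfl
    have : p.natAbs = 0 := Nat.eq_zero_of_zero_dvd hdvd
    omega
  have hm2 : 2 ≤ m := by omega
  have hdi : (m : Int) ∣ p := by
    have := Int.natCast_dvd_natCast.mpr hdvd
    rwa [hp0] at this
  exact h m (by exact_mod_cast hm2) (by omega) hdi

theorem pvStrip_spec (d : Int) (hd : 2 ≤ d) :
    ∀ (fuel : Nat) (m : Int), 1 ≤ m → m.toNat ≤ fuel →
      1 ≤ (pvStrip m d fuel).1 ∧ ¬ d ∣ (pvStrip m d fuel).1 ∧ 0 ≤ (pvStrip m d fuel).2 ∧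
      m = (pvStrip m d fuel).1 * d ^ (pvStrip m d fuel).2.toNat ∧
      (d ∣ m → 1 ≤ (pvStrip m d fuel).2) := by
  intro fuel
  induction fuel with
  | zero => intro m hm hf; exact absurd hf (by omega)
  | succ fuel ih =>
    intro m hm hf
    by_cases hdvd : d ∣ m
    · have hmod : PySem.Int.mod m d = 0 := (PySem.Int.mod_eq_zero_iff_dvd m d).mpr hdvd
      have hfd : PySem.Int.floordiv m d = m / d := PySem.Int.floordiv_eq_ediv_of_pos (by omega)
      have hdm : d ≤ m := Int.le_of_dvd (by omega) hdvd
      have hq : m / d * d = m := Int.ediv_mul_cancel hdvd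
      have hm1 : 1 ≤ m / d := by nlinarith [hq]
      have hlt : m / d < m := by nlinarith [hq]
      have hf' : (m / d).toNat ≤ fuel := by omega
      obtain ⟨h1, h2, h3, h4, h5⟩ := ih (m / d) hm1 hf'
      simp only [pvStrip, hmod, if_pos, hfd]
      refine ⟨h1, h2, by omega, ?_, fun _ => by omega⟩
      have he : ((pvStrip (m / d) d fuel).2 + 1).toNat = (pvStrip (m / d) d fuel).2.toNat + 1 := by
        omega
      rw [he, pow_succ, ← mul_assoc, ← h4, hq]
    · have hmod : ¬ PySem.Int.mod m d = 0 := fun hc =>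
        hdvd ((PySem.Int.mod_eq_zero_iff_dvd m d).mp hc)
      simp only [pvStrip, hmod, if_false]
      exact ⟨hm, hdvd, le_refl _, by simp, fun hc => absurd hc hdvd⟩

theorem pv_prime_or_one (m d : Int) (hm : 1 ≤ m) (hd : 2 ≤ d)
    (hno : ∀ k : Int, 2 ≤ k → k < d → ¬ k ∣ m) (hlt : m < d * d) : m = 1 ∨ Prime m := by
  by_cases h1 : m = 1
  · exact Or.inl h1
  · right
    apply pv_int_prime_of m (by omega)
    intro k hk2 hkm hkdvd
    have hq : k * (m / k) = m := Int.mul_ediv_cancel' hkdvd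
    have hjpos : 0 < m / k := by nlinarith
    have hj1 : m / k ≠ 1 := by intro hc; rw [hc, mul_one] at hq; omega
    have hkd : d ≤ k := by
      by_contra hc; push_neg at hc; exact hno k hk2 hc hkdvd
    have hjdvd : m / k ∣ m := ⟨k, by linarith [mul_comm k (m / k)]⟩
    have hjd : d ≤ m / k := by
      by_contra hc; push_neg at hc; exact hno (m / k) (by omega) hc hjdvd
    nlinarith

theorem pvFac_spec :
    ∀ (fuel : Nat) (m d : Int) (acc : List (Int × Int)),
      1 ≤ m → 2 ≤ d → (∀ k : Int, 2 ≤ k → k < d → ¬ k ∣ m) →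
      Int.sqrt m < d + (fuel : Int) →
      ∃ tail : List (Int × Int),
        (pvFac m d fuel acc).2 = acc ++ tail ∧
        m = (pvFac m d fuel acc).1 * (tail.map (fun pe => pe.1 ^ pe.2.toNat)).prod ∧
        1 ≤ (pvFac m d fuel acc).1 ∧
        ((pvFac m d fuel acc).1 = 1 ∨ Prime (pvFac m d fuel acc).1) ∧
        (∀ pe ∈ tail, Prime pe.1 ∧ 1 ≤ pe.2 ∧ d ≤ pe.1 ∧ ¬ pe.1 ∣ (pvFac m d fuel acc).1) ∧
        (tail.map Prod.fst).Pairwise (· < ·) := by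
  intro fuel
  induction fuel with
  | zero =>
    intro m d acc hm hd hno hf
    have hlt : m < d * d := pv_lt_of_sqrt_lt m d (by omega) (by omega) (by
      simpa using hf)
    exact ⟨[], by simp [pvFac], by simp [pvFac],
      by simpa [pvFac] using hm, pv_prime_or_one m d hm hd hno hlt, by simp, by simp⟩
  | succ fuel ih =>
    intro m d acc hm hd hno hf
    by_cases hle : d * d ≤ m
    · by_cases hdvd : d ∣ m
      · have hmod : PySem.Int.mod m d = 0 := (PySem.Int.mod_eq_zero_iff_dvd m d).mpr hdvd
        obtain ⟨h1, h2, h3, h4, h5⟩ := pvStrip_spec d hd m.toNat m hm (le_refl _)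
        set r := pvStrip m d m.toNat with hr
        have he1 : 1 ≤ r.2 := h5 hdvd
        have hstep : pvFac m d (fuel + 1) acc = pvFac r.1 (d + 1) fuel (acc ++ [(d, r.2)]) := by
          simp [pvFac, hle, hmod, ← hr]
        have hr1m : r.1 ∣ m := ⟨d ^ r.2.toNat, h4⟩
        have hr1le : r.1 ≤ m := Int.le_of_dvd (by omega) hr1m
        have hno' : ∀ k : Int, 2 ≤ k → k < d + 1 → ¬ k ∣ r.1 := by
          intro k hk2 hkd hkdvd
          by_cases hkd' : k = d
          · exact h2 (hkd' ▸ hkdvd)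
          · exact hno k hk2 (by omega) (hkdvd.trans hr1m)
        have hf' : Int.sqrt r.1 < (d + 1) + (fuel : Int) := by
          have := pv_sqrt_mono r.1 m (by omega) hr1le
          push_cast at hf
          omega
        obtain ⟨tail', e1, e2, e3, e4, e5, e6⟩ := ih r.1 (d + 1) (acc ++ [(d, r.2)]) h1
          (by omega) hno' hf'
        rw [hstep]
        refine ⟨(d, r.2) :: tail', by simp [e1], ?_, e3, e4, ?_, ?_⟩
        · simp only [List.map_cons, List.prod_cons]
          linear_combination h4 + d ^ r.2.toNat * e2
        · have hfadvd : (pvFac r.1 (d + 1) fuel (acc ++ [(d, r.2)])).1 ∣ r.1 :=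
            ⟨(tail'.map (fun pe => pe.1 ^ pe.2.toNat)).prod, e2⟩
          have hdprime : Prime d := by
            apply pv_int_prime_of d hd
            intro k hk2 hkd hkdvd
            exact hno k hk2 hkd (hkdvd.trans hdvd)
          intro pe hpe
          rcases List.mem_cons.mp hpe with rfl | hpe'
          · exact ⟨hdprime, he1, le_refl _, fun hc => h2 (hc.trans hfadvd)⟩
          · obtain ⟨q1, q2, q3, q4⟩ := e5 pe hpe'
            exact ⟨q1, q2, by omega, q4⟩
        · rw [List.map_cons]
          refine List.pairwise_cons.mpr ⟨?_, e6⟩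
          intro q hq
          obtain ⟨pe, hpe, rfl⟩ := List.mem_map.mp hq
          have := (e5 pe hpe).2.2.1
          omega
      · have hmod : ¬ PySem.Int.mod m d = 0 := fun hc =>
          hdvd ((PySem.Int.mod_eq_zero_iff_dvd m d).mp hc)
        have hstep : pvFac m d (fuel + 1) acc = pvFac m (d + 1) fuel acc := by
          simp [pvFac, hle, hmod]
        have hno' : ∀ k : Int, 2 ≤ k → k < d + 1 → ¬ k ∣ m := by
          intro k hk2 hkd hkdvd
          by_cases hkd' : k = d
          · exact hdvd (hkd' ▸ hkdvd)
          · exact hno k hk2 (by omega) hkdvd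
        have hf' : Int.sqrt m < (d + 1) + (fuel : Int) := by push_cast at hf; omega
        obtain ⟨tail', e1, e2, e3, e4, e5, e6⟩ := ih m (d + 1) acc hm (by omega) hno' hf'
        rw [hstep]
        refine ⟨tail', e1, e2, e3, e4, ?_, e6⟩
        intro pe hpe
        obtain ⟨q1, q2, q3, q4⟩ := e5 pe hpe
        exact ⟨q1, q2, by omega, q4⟩
    · push_neg at hle
      have hnle : ¬ d * d ≤ m := by omega
      have hstep : pvFac m d (fuel + 1) acc = (m, acc) := by
        simp [pvFac, hnle]
      rw [hstep]
      exact ⟨[], by simp, by simp, hm, pv_prime_or_one m d hm hd hno hle, by simp, by simp⟩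

-- the inner scaling fold, in closed form
theorem pv_inner_eq (divs : List Int) (p : Int) (k : Nat) :
    ((PySem.List.pyRange 0 (k : Int) 1).foldl
      (fun st _ => (st.1 * p, st.2 ++ divs.map (fun x => x * (st.1 * p)))) (1, ([] : List Int)))
    = (p ^ k, (List.range k).flatMap (fun a => divs.map (fun y => y * p ^ (a + 1)))) := by
  induction k with
  | zero =>
    rw [show ((0 : Nat) : Int) = 0 by simp, PySem.List.pyRange_one_eq_nil (le_refl 0)]
    simp
  | succ k ih =>
    rw [show ((k + 1 : Nat) : Int) = (k : Int) + 1 by push_cast; ring,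
      PySem.List.pyRange_one_succ_right (by exact_mod_cast Nat.zero_le k),
      List.foldl_append, ih]
    simp only [List.foldl_cons, List.foldl_nil, List.range_succ, List.flatMap_append,
      List.flatMap_cons, List.flatMap_nil, List.append_nil, pow_succ]
  

-- decomposition of a divisor of P * p^k, p prime not dividing P
theorem pv_dvd_decomp (P p : Int) (hp : Prime p) (hp2 : 2 ≤ p) (hnd : ¬ p ∣ P) :
    ∀ (k : Nat) (x : Int), 0 < x → x ∣ P * p ^ k →
      ∃ a : Nat, a ≤ k ∧ ∃ y : Int, 0 < y ∧ y ∣ P ∧ x = y * p ^ a := by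
  intro k
  induction k with
  | zero =>
    intro x hx hdvd
    exact ⟨0, le_refl 0, x, hx, by simpa using hdvd, by simp⟩
  | succ k ih =>
    intro x hx hdvd
    by_cases hpx : p ∣ x
    · obtain ⟨x', rfl⟩ := hpx
      have hx' : 0 < x' := by nlinarith
      have hdvd' : x' ∣ P * p ^ k := by
        have h1 : p * x' ∣ p * (P * p ^ k) := by
          have h2 : P * p ^ (k + 1) = p * (P * p ^ k) := by ring
          rwa [h2] at hdvd
        exact (mul_dvd_mul_iff_left (by omega : p ≠ 0)).mp h1
      obtain ⟨a, ha, y, hy, hyP, rfl⟩ := ih x' hx' hdvd'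
      exact ⟨a + 1, by omega, y, hy, hyP, by ring⟩
    · have hgcd : Int.gcd p x = 1 := by
        have h1 : (Int.gcd p x : Int) ∣ p := Int.gcd_dvd_left p x
        have h2 : Int.gcd p x ∣ p.natAbs := by
          rw [← Int.natCast_dvd_natCast]
          exact Int.dvd_natAbs.mpr h1
        have hpn : Nat.Prime p.natAbs := Int.prime_iff_natAbs_prime.mp hp
        rcases (Nat.Prime.eq_one_or_self_of_dvd hpn _ h2) with h | h
        · exact h
        · exfalso
          apply hpx
          have h3 : (Int.gcd p x : Int) ∣ x := Int.gcd_dvd_right p x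
          rw [h, Int.natAbs_of_nonneg (by omega : (0:Int) ≤ p)] at h3
          exact h3
      have hcp : IsCoprime p x := Int.isCoprime_iff_gcd_eq_one.mpr hgcd
      have hcop : IsCoprime x (p ^ (k + 1)) := (hcp.symm).pow_right
      exact ⟨0, by omega, x, hx, hcop.dvd_of_dvd_mul_right hdvd, by simp⟩

theorem pvScale_eq (divs : List Int) (p : Int) (k : Nat) :
    pvScale divs p (k : Int)
      = (List.range k).flatMap (fun a => divs.map (fun y => y * p ^ (a + 1))) := by
  rw [pvScale, pv_inner_eq]

theorem pv_mem_scale (divs : List Int) (p : Int) (k : Nat) (x : Int) :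
    x ∈ pvScale divs p (k : Int) ↔ ∃ a : Nat, a < k ∧ ∃ y ∈ divs, x = y * p ^ (a + 1) := by
  rw [pvScale_eq]
  simp only [List.mem_flatMap, List.mem_range, List.mem_map]
  constructor
  · rintro ⟨a, ha, y, hy, rfl⟩
    exact ⟨a, ha, y, hy, rfl⟩
  · rintro ⟨a, ha, y, hy, rfl⟩
    exact ⟨a, ha, y, hy, rfl⟩

theorem pv_nodup_scale (divs : List Int) (p : Int) (k : Nat) (hp2 : 2 ≤ p)
    (hnd : divs.Nodup) (hpd : ∀ y ∈ divs, ¬ p ∣ y) :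
    (pvScale divs p (k : Int)).Nodup := by
  rw [pvScale_eq, List.nodup_flatMap]
  constructor
  · intro a _
    exact hnd.map (mul_left_injective₀ (pow_ne_zero _ (by omega : p ≠ 0)))
  · apply List.Pairwise.imp_of_mem ?_ List.pairwise_lt_range
    intro a b _ _ hab
    intro x hxa hxb
    obtain ⟨y, hy, rfl⟩ := List.mem_map.mp hxa
    obtain ⟨y', hy', heq⟩ := List.mem_map.mp hxb
    have hbsplit : b + 1 = (a + 1) + (b - a) := by omega
    rw [hbsplit, pow_add] at heq
    have hcancel : y' * p ^ (b - a) = y := by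
      apply mul_right_cancel₀ (pow_ne_zero (a + 1) (by omega : p ≠ 0))
      linear_combination heq
    have hpdy : p ∣ y := by
      rw [← hcancel]
      exact ((dvd_pow_self p (by omega : b - a ≠ 0)).mul_left y')
    exact hpd y hy hpdy

-- the generation fold: exact divisor list, no duplicates
theorem pvGen_inv :
    ∀ (F : List (Int × Int)) (P : Int) (D : List Int),
      1 ≤ P → (∀ x, x ∈ D ↔ 0 < x ∧ x ∣ P) → D.Nodup →
      (∀ pe ∈ F, Prime pe.1 ∧ 2 ≤ pe.1 ∧ 1 ≤ pe.2 ∧ ¬ pe.1 ∣ P) →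
      (F.map Prod.fst).Nodup →
      (∀ x, x ∈ F.foldl (fun divs pe => divs ++ pvScale divs pe.1 pe.2) D ↔
          0 < x ∧ x ∣ P * (F.map (fun pe => pe.1 ^ pe.2.toNat)).prod) ∧
      (F.foldl (fun divs pe => divs ++ pvScale divs pe.1 pe.2) D).Nodup := by
  intro F
  induction F with
  | nil =>
    intro P D hP hD hnd hF hFn
    simpa using ⟨hD, hnd⟩
  | cons pe F' ih =>
    intro P D hP hD hnd hF hFn
    obtain ⟨hprime, hp2, he1, hpP⟩ := hF pe (List.mem_cons_self ..)
    obtain ⟨k, hk⟩ : ∃ k : Nat, pe.2 = (k : Int) := ⟨pe.2.toNat, by omega⟩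
    have hkt : pe.2.toNat = k := by omega
    have hDpos : ∀ y ∈ D, 0 < y := fun y hy => ((hD y).mp hy).1
    have hDdvd : ∀ y ∈ D, y ∣ P := fun y hy => ((hD y).mp hy).2
    have hpnd : ∀ y ∈ D, ¬ pe.1 ∣ y := fun y hy hc => hpP (hc.trans (hDdvd y hy))
    have hmem1 : ∀ x, x ∈ D ++ pvScale D pe.1 pe.2 ↔ 0 < x ∧ x ∣ P * pe.1 ^ k := by
      intro x
      rw [List.mem_append, hk, pv_mem_scale]
      constructor
      · rintro (hx | ⟨a, ha, y, hy, rfl⟩)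
        · exact ⟨((hD x).mp hx).1, ((hD x).mp hx).2.mul_right _⟩
        · refine ⟨mul_pos (hDpos y hy) (pow_pos (by omega) _), ?_⟩
          exact mul_dvd_mul (hDdvd y hy) (pow_dvd_pow pe.1 (by omega))
      · rintro ⟨hx, hdvd⟩
        obtain ⟨a, ha, y, hy0, hyP, rfl⟩ := pv_dvd_decomp P pe.1 hprime hp2 hpP k x hx hdvd
        cases a with
        | zero =>
          left
          rw [pow_zero, mul_one]
          exact (hD y).mpr ⟨hy0, hyP⟩
        | succ a =>
          right
          exact ⟨a, by omega, y, (hD y).mpr ⟨hy0, hyP⟩, rfl⟩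
    have hnd1 : (D ++ pvScale D pe.1 pe.2).Nodup := by
      rw [hk]
      refine List.Nodup.append hnd (pv_nodup_scale D pe.1 k hp2 hnd hpnd) ?_
      intro x hxD hxS
      rw [pv_mem_scale] at hxS
      obtain ⟨a, ha, y, hy, rfl⟩ := hxS
      exact hpnd _ hxD ((dvd_pow_self pe.1 (Nat.succ_ne_zero a)).mul_left y)
    have hP1 : 1 ≤ P * pe.1 ^ k := by
      have h1 : 0 < pe.1 ^ k := pow_pos (by omega) _
      nlinarith
    have hF' : ∀ q ∈ F', Prime q.1 ∧ 2 ≤ q.1 ∧ 1 ≤ q.2 ∧ ¬ q.1 ∣ P * pe.1 ^ k := by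
      intro q hq
      obtain ⟨q1, q2, q3, q4⟩ := hF q (List.mem_cons_of_mem _ hq)
      refine ⟨q1, q2, q3, ?_⟩
      intro hc
      rcases (Prime.dvd_mul q1).mp hc with h | h
      · exact q4 h
      · have hqp : q.1 ∣ pe.1 := q1.dvd_of_dvd_pow h
        have heq : q.1 = pe.1 := by
          have hqn := Int.prime_iff_natAbs_prime.mp q1
          have hpn := Int.prime_iff_natAbs_prime.mp hprime
          have hd : q.1.natAbs ∣ pe.1.natAbs := Int.natAbs_dvd_natAbs.mpr hqp
          have := (Nat.prime_dvd_prime_iff_eq hqn hpn).mp hd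
          omega
        have hmem : q.1 ∈ F'.map Prod.fst := List.mem_map.mpr ⟨q, hq, rfl⟩
        rw [List.map_cons] at hFn
        exact (List.nodup_cons.mp hFn).1 (heq ▸ hmem)
    have hFn' : (F'.map Prod.fst).Nodup := by
      rw [List.map_cons] at hFn
      exact (List.nodup_cons.mp hFn).2
    have hres := ih (P * pe.1 ^ k) (D ++ pvScale D pe.1 pe.2) hP1 hmem1 hnd1 hF' hFn'
    simp only [List.foldl_cons]
    refine ⟨fun x => ?_, hres.2⟩
    have hrw : P * ((pe.1 ^ pe.2.toNat) * (F'.map (fun q => q.1 ^ q.2.toNat)).prod)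
        = P * pe.1 ^ k * (F'.map (fun q => q.1 ^ q.2.toNat)).prod := by
      rw [hkt]; ring
    rw [List.map_cons, List.prod_cons, hrw]
    exact hres.1 x

theorem pv_mem_canon (n x : Int) (hn : 1 ≤ n) : x ∈ pvCanon n ↔ 0 < x ∧ x ∣ n := by
  unfold pvCanon
  simp only [List.mem_filter, PySem.List.mem_pyRange_one, decide_eq_true_eq]
  constructor
  · rintro ⟨⟨h1, h2⟩, h3⟩
    exact ⟨by omega, h3⟩
  · rintro ⟨h1, h2⟩
    exact ⟨⟨by omega, by have := Int.le_of_dvd (by omega) h2; omega⟩, h2⟩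

theorem pv_canon_pairwise (n : Int) : (pvCanon n).Pairwise (· < ·) :=
  (PySem.List.pairwise_lt_pyRange_one _ _).filter _

theorem pv_canon_nodup (n : Int) : (pvCanon n).Nodup :=
  (pv_canon_pairwise n).imp (fun h => ne_of_lt h)

theorem pv_aset_nodup (n : Int) : (pvASet n).Nodup := by
  unfold pvASet
  exact pv_nodup_fold n _ _ (by simp [PySem.Set.empty])

theorem pv_sortedA (n : Int) (hn : 1 ≤ n) :
    PySem.List.sorted (pvASet n) (fun x => x) false = pvCanon n := by
  apply PySem.List.sorted_eq_of_perm_of_pairwise_lt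
  · rw [List.perm_ext_iff_of_nodup (pv_canon_nodup n) (pv_aset_nodup n)]
    intro x
    rw [pv_mem_canon n x hn]
    exact (pv_mem_aset n x hn).symm
  · exact pv_canon_pairwise n

theorem pv_sqrt_le_self (n : Int) (hn : 0 ≤ n) : Int.sqrt n ≤ n := by
  rw [Int.sqrt]
  have := Nat.sqrt_le_self n.toNat
  omega

-- unfolding equations for the two ports (definitional)
theorem pv_A_eq (n p : Int) : get_divisor_at_percentile n p =
    (if ¬ (0 ≤ p ∧ p ≤ 100) then 0
     else if PySem.List.sorted (pvASet n) (fun x => x) false = [] then 1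
     else (PySem.List.pyGet? (PySem.List.sorted (pvASet n) (fun x => x) false)
       (PySem.Int.floordiv
         ((((PySem.List.sorted (pvASet n) (fun x => x) false).length : Int) - 1) * p)
         100)).getD 0) := rfl

theorem pv_B_eq (n p : Int) : get_divisor_at_percentile_alt n p =
    (if ¬ (0 ≤ p ∧ p ≤ 100) then 0
     else if n = 0 then 1
     else
       (PySem.List.pyGet?
         (PySem.List.sorted (pvGen (if 1 < (pvFac n 2 (n.toNat + 1) []).1
             then (pvFac n 2 (n.toNat + 1) []).2 ++ [((pvFac n 2 (n.toNat + 1) []).1, 1)]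
             else (pvFac n 2 (n.toNat + 1) []).2)) (fun x => x) false)
         (PySem.Int.floordiv
           ((((PySem.List.sorted (pvGen (if 1 < (pvFac n 2 (n.toNat + 1) []).1
               then (pvFac n 2 (n.toNat + 1) []).2 ++ [((pvFac n 2 (n.toNat + 1) []).1, 1)]
               else (pvFac n 2 (n.toNat + 1) []).2)) (fun x => x) false).length : Int) - 1) * p)
           100)).getD 0) := rfl

-- ===== VERDICT (by name: the statement is the Claim_ definition above) =====
theorem get_divisor_at_percentile_spec : Claim_equal_get_divisor_at_percentile := by
  intro n p hdom hpre
  obtain ⟨hn, hp0, hp1⟩ := hpre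
  have hguard : ¬¬(0 ≤ p ∧ p ≤ 100) := fun h => h ⟨hp0, hp1⟩
  unfold Spec_get_divisor_at_percentile
  rw [pv_A_eq, pv_B_eq, if_neg hguard, if_neg hguard]
  by_cases hn0 : n = 0
  · subst hn0
    rw [if_pos rfl, if_pos (by decide : PySem.List.sorted (pvASet 0) (fun x => x) false = [])]
  · have hn1 : 1 ≤ n := by omega
    rw [if_neg hn0]
    -- A's sorted set is the canonical divisor list
    have hA : PySem.List.sorted (pvASet n) (fun x => x) false = pvCanon n := pv_sortedA n hn1
    -- B's factorisation
    obtain ⟨tail, e1, e2, e3, e4, e5, e6⟩ := pvFac_spec (n.toNat + 1) n 2 [] hn1 (le_refl 2)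
      (fun k hk2 hkd _ => absurd hk2 (by omega))
      (by
        have := pv_sqrt_le_self n (by omega)
        push_cast
        omega)
    rw [List.nil_append] at e1
    -- the factor list FF of port B, with the properties pvGen_inv needs
    have hEpos := e3
    have hgood : n = 1 * (((if 1 < (pvFac n 2 (n.toNat + 1) []).1
            then (pvFac n 2 (n.toNat + 1) []).2 ++ [((pvFac n 2 (n.toNat + 1) []).1, 1)]
            else (pvFac n 2 (n.toNat + 1) []).2)).map (fun q => q.1 ^ q.2.toNat)).prod ∧
        (∀ q ∈ (if 1 < (pvFac n 2 (n.toNat + 1) []).1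
            then (pvFac n 2 (n.toNat + 1) []).2 ++ [((pvFac n 2 (n.toNat + 1) []).1, 1)]
            else (pvFac n 2 (n.toNat + 1) []).2),
          Prime q.1 ∧ 2 ≤ q.1 ∧ 1 ≤ q.2 ∧ ¬ q.1 ∣ 1) ∧
        (((if 1 < (pvFac n 2 (n.toNat + 1) []).1
            then (pvFac n 2 (n.toNat + 1) []).2 ++ [((pvFac n 2 (n.toNat + 1) []).1, 1)]
            else (pvFac n 2 (n.toNat + 1) []).2).map Prod.fst)).Nodup := by
      have hnotdvd1 : ∀ a : Int, 2 ≤ a → ¬ a ∣ 1 := by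
        intro a ha hc
        have := Int.le_of_dvd one_pos hc
        omega
      by_cases hE : 1 < (pvFac n 2 (n.toNat + 1) []).1
      · have hEprime : Prime (pvFac n 2 (n.toNat + 1) []).1 := by
          rcases e4 with h | h
          · omega
          · exact h
        rw [if_pos hE, e1]
        refine ⟨?_, ?_, ?_⟩
        · rw [List.map_append, List.prod_append]
          simp only [List.map_cons, List.map_nil, List.prod_cons, List.prod_nil]
          have ht : ((1 : Int).toNat) = 1 := rfl
          rw [ht, pow_one, mul_one, one_mul]
          linear_combination e2
        · intro q hq
          rcases List.mem_append.mp hq with hq | hq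
          · obtain ⟨q1, q2, q3, q4⟩ := e5 q hq
            exact ⟨q1, by omega, q2, hnotdvd1 _ (by omega)⟩
          · rcases List.mem_singleton.mp hq with rfl
            exact ⟨hEprime, by omega, le_refl 1, hnotdvd1 _ (by omega)⟩
        · rw [List.map_append]
          refine List.Nodup.append (e6.imp (fun h => ne_of_lt h)) (by simp) ?_
          intro a ha hb
          simp only [List.map_cons, List.map_nil, List.mem_cons, List.not_mem_nil,
            or_false] at hb
          obtain ⟨q, hq, rfl⟩ := List.mem_map.mp ha
          exact (e5 q hq).2.2.2 (hb ▸ dvd_refl _)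
      · have hE1 : (pvFac n 2 (n.toNat + 1) []).1 = 1 := by omega
        rw [if_neg hE, e1]
        refine ⟨by linear_combination e2 +
            (List.map (fun pe => pe.1 ^ pe.2.toNat) tail).prod * hE1,
          ?_, e6.imp (fun h => ne_of_lt h)⟩
        intro q hq
        obtain ⟨q1, q2, q3, q4⟩ := e5 q hq
        exact ⟨q1, by omega, q2, hnotdvd1 _ (by omega)⟩
    obtain ⟨hgp, hgF, hgN⟩ := hgood
    have hgen := pvGen_inv _ 1 [1] (le_refl 1)
      (fun x => by
        simp only [List.mem_singleton]
        constructor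
        · rintro rfl
          exact ⟨one_pos, one_dvd 1⟩
        · rintro ⟨hx1, hx2⟩
          have := Int.le_of_dvd one_pos hx2
          omega)
      (List.nodup_singleton 1) hgF hgN
    have hmem' : ∀ x, x ∈ pvGen (if 1 < (pvFac n 2 (n.toNat + 1) []).1
        then (pvFac n 2 (n.toNat + 1) []).2 ++ [((pvFac n 2 (n.toNat + 1) []).1, 1)]
        else (pvFac n 2 (n.toNat + 1) []).2) ↔ 0 < x ∧ x ∣ n := by
      intro x
      rw [pvGen, hgen.1 x, ← hgp]
    have hB : PySem.List.sorted (pvGen (if 1 < (pvFac n 2 (n.toNat + 1) []).1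
        then (pvFac n 2 (n.toNat + 1) []).2 ++ [((pvFac n 2 (n.toNat + 1) []).1, 1)]
        else (pvFac n 2 (n.toNat + 1) []).2)) (fun x => x) false = pvCanon n := by
      apply PySem.List.sorted_eq_of_perm_of_pairwise_lt
      · rw [List.perm_ext_iff_of_nodup (pv_canon_nodup n) (by rw [pvGen]; exact hgen.2)]
        intro x
        rw [pv_mem_canon n x hn1]
        exact (hmem' x).symm
      · exact pv_canon_pairwise n
    rw [hA, hB]
    have hne : pvCanon n ≠ [] :=
      List.ne_nil_of_mem ((pv_mem_canon n 1 hn1).mpr ⟨one_pos, one_dvd n⟩)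
    rw [if_neg hne]
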